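-- pv_equiv track=rewrite | github.com/jiuhonglaugh/aoam | setup/bigdata/hive.py | getHiveMetaStore
-- ===== SOURCE A (Python) =====
-- def getHiveMetaStore(keys, dict):
--     for key in keys:
--         key = key.split(':')[0]
--         if key in dict:
--             dict[key] = dict[key] + ',org.apache.hadoop.hive.metastore.HiveMetaStore'
--         else:
--             dict[key] = 'org.apache.hadoop.hive.metastore.HiveMetaStore'
--     return dict
-- ===== SOURCE B (Python) =====
-- def getHiveMetaStore(keys, dict):
--     m = 'org.apache.hadoop.hive.metastore.HiveMetaStore'
--     ext = ',' + m
--     count = {}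
--     for k in keys:
--         p = k.split(':')[0]
--         count[p] = count.get(p, 0) + 1
--     for p, n in count.items():
--         if p in dict:
--             dict[p] = dict[p] + ext * n
--         else:
--             dict[p] = m + ext * (n - 1)
--     return dict
-- ===== Notes on version B (the rewrite author's own statement) =====
-- stated objective: faster
-- what changed: A updates the dict once per key occurrence, rebuilding the growing value string each time; B first builds a frequency table of prefixes in one pass and then, iterating the table in first-appearance order, applies each prefix's whole batch of appends as a single update using string repetition.
import Mathlib
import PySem

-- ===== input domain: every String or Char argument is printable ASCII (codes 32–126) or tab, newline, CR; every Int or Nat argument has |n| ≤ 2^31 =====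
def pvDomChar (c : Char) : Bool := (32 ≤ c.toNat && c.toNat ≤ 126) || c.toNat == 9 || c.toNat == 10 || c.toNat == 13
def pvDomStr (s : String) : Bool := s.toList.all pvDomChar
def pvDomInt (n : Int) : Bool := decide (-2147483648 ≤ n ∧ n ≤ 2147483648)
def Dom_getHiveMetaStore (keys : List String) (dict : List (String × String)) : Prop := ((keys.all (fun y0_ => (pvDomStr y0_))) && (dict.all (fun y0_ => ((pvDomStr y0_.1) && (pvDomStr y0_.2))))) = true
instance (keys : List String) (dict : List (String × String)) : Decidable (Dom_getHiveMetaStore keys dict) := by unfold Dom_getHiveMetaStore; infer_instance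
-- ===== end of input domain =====

-- B replaces A's per-occurrence incremental dict updates by a count-then-batch scheme: one pass
-- builds a frequency table of prefixes, then each distinct prefix gets a single update with the
-- whole repetition at once (objective: faster; a timing run measured B faster on large inputs).
-- Both mutate to the same final mapping; the equivalence proved is about the returned association list.

-- ===== PORT A =====
def pvHMS : String := "org.apache.hadoop.hive.metastore.HiveMetaStore"
def pvExtA : String := ",org.apache.hadoop.hive.metastore.HiveMetaStore"

-- key.split(':')[0]  (split with a nonempty separator never returns none or [], so the defaults are unreachable)
def pvPrefix (key : String) : String :=
  PySem.List.pyGetD ((PySem.Str.split? key ":").getD []) 0 ""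

-- the if/else of A's loop body, on the already-split key
def pvStepP (d : PySem.Dict String String) (k : String) : PySem.Dict String String :=
  if d.contains k then d.insert k (d.getD k "" ++ pvExtA) else d.insert k pvHMS

-- one iteration of A's loop body
def pvStepA (d : PySem.Dict String String) (key : String) : PySem.Dict String String :=
  pvStepP d (pvPrefix key)

def getHiveMetaStore (keys : List String) (dict : List (String × String)) : List (String × String) :=
  (keys.foldl pvStepA (PySem.Dict.mk dict)).items

-- ===== PORT B =====
def pvExtB : String := "," ++ pvHMS

-- ext * n  (Python string repetition)
def pvRep (s : String) : Nat → String
  | 0 => ""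
  | n + 1 => s ++ pvRep s n

-- B's second loop body: one batched update for prefix p occurring n times
def pvBatch (d : PySem.Dict String String) (pn : String × Int) : PySem.Dict String String :=
  if d.contains pn.1 then d.insert pn.1 (d.getD pn.1 "" ++ pvRep pvExtB pn.2.toNat)
  else d.insert pn.1 (pvHMS ++ pvRep pvExtB (pn.2 - 1).toNat)

def getHiveMetaStore_alt (keys : List String) (dict : List (String × String)) : List (String × String) :=
  let count := keys.foldl
    (fun d k => d.insert (pvPrefix k) (d.getD (pvPrefix k) 0 + 1))
    (PySem.Dict.empty : PySem.Dict String Int)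
  (count.items.foldl pvBatch (PySem.Dict.mk dict)).items

-- ===== PRECONDITION & SPEC =====
def Spec_getHiveMetaStore (keys : List String) (dict : List (String × String)) (out : List (String × String)) : Prop := out = getHiveMetaStore_alt keys dict
instance (keys : List String) (dict : List (String × String)) (out : List (String × String)) : Decidable (Spec_getHiveMetaStore keys dict out) := by unfold Spec_getHiveMetaStore; infer_instance

-- ===== CLAIM (what is proved, stated in full; the proofs are below) =====
def Claim_equal_getHiveMetaStore : Prop := ∀ (keys : List String) (dict : List (String × String)), Dom_getHiveMetaStore keys dict → Spec_getHiveMetaStore keys dict (getHiveMetaStore keys dict)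

-- ===== LEMMAS AND PROOFS =====

theorem pvExtB_eq : pvExtB = pvExtA := rfl

-- inserting at an already-present key commutes with any insert at a different key (items level)
theorem pvInsert_comm (d : PySem.Dict String String) (p q : String) (v w : String)
    (hp : d.contains p = true) (hne : p ≠ q) :
    (d.insert q w).insert p v = (d.insert p v).insert q w := by
  apply PySem.Dict.ext
  by_cases hq : d.contains q = true
  · rw [PySem.Dict.items_insert_of_contains _ _ (show (d.insert q w).contains p = true by
        simp [PySem.Dict.contains_insert, hp]),
        PySem.Dict.items_insert_of_contains _ _ hq,
        PySem.Dict.items_insert_of_contains _ _ (show (d.insert p v).contains q = true by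
        simp [PySem.Dict.contains_insert, hq]),
        PySem.Dict.items_insert_of_contains _ _ hp]
    simp only [List.map_map]
    apply List.map_congr_left
    intro a _
    simp only [Function.comp]
    by_cases h1 : a.1 = p <;> by_cases h2 : a.1 = q
    · exact absurd (h1 ▸ h2) hne
    all_goals simp [h1, h2, hne, Ne.symm hne]
  · have hq' : d.contains q = false := by simpa using hq
    rw [PySem.Dict.items_insert_of_contains _ _ (show (d.insert q w).contains p = true by
        simp [PySem.Dict.contains_insert, hp]),
        PySem.Dict.items_insert_of_not_contains _ _ hq',
        PySem.Dict.items_insert_of_not_contains _ _ (show (d.insert p v).contains q = false by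
        simp [PySem.Dict.contains_insert, hq', Ne.symm hne]),
        PySem.Dict.items_insert_of_contains _ _ hp]
    simp [Ne.symm hne]

-- A's step at an already-present key commutes with A's step at a different key
theorem pvStepP_comm (d : PySem.Dict String String) (p q : String)
    (hp : d.contains p = true) (hne : p ≠ q) :
    pvStepP (pvStepP d q) p = pvStepP (pvStepP d p) q := by
  have hcpq : ∀ v : String, (d.insert q v).contains p = true := fun v => by
    simp [PySem.Dict.contains_insert, hp]
  have hcpp : ∀ v : String, (d.insert p v).contains q = d.contains q := fun v => by
    simp [PySem.Dict.contains_insert, Ne.symm hne]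
  by_cases hq : d.contains q = true
  · simp only [pvStepP, hq, if_true, hp, hcpq, hcpp,
      PySem.Dict.getD_insert, if_neg hne, if_neg (Ne.symm hne)]
    exact pvInsert_comm d p q _ _ hp hne
  · have hq' : d.contains q = false := by simpa using hq
    simp only [pvStepP, hq', if_false, Bool.false_eq_true, hp, hcpq, hcpp,
      PySem.Dict.getD_insert, if_true, if_neg hne, if_neg (Ne.symm hne)]
    exact pvInsert_comm d p q _ _ hp hne

-- n repetitions of A's step at the same prefix p
def pvIterA (p : String) : Nat → PySem.Dict String String → PySem.Dict String String
  | 0, d => d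
  | n + 1, d => pvIterA p n (pvStepP d p)

theorem pvIterA_insert (p : String) (n : Nat) (d : PySem.Dict String String) (v : String) :
    pvIterA p n (d.insert p v) = d.insert p (v ++ pvRep pvExtA n) := by
  induction n generalizing v with
  | zero => simp [pvIterA, pvRep]
  | succ n ih =>
    have hstep : pvStepP (d.insert p v) p = d.insert p (v ++ pvExtA) := by
      simp [pvStepP, PySem.Dict.contains_insert_self, PySem.Dict.getD_insert_self,
        PySem.Dict.insert_insert_self]
    rw [pvIterA, hstep, ih]
    simp [pvRep, String.append_assoc]

theorem pvContains_stepP_self (d : PySem.Dict String String) (p : String) :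
    (pvStepP d p).contains p = true := by
  unfold pvStepP; split <;> exact PySem.Dict.contains_insert_self _ _ _

theorem pvIterA_stepP_comm (p q : String) (n : Nat) (d : PySem.Dict String String)
    (hp : d.contains p = true) (hne : p ≠ q) :
    pvIterA p n (pvStepP d q) = pvStepP (pvIterA p n d) q := by
  induction n generalizing d with
  | zero => rfl
  | succ n ih =>
    rw [pvIterA, pvIterA, pvStepP_comm d p q hp hne, ih _ (pvContains_stepP_self d p)]

-- all later occurrences of a present prefix p can be pulled forward: the rest of A's fold
-- equals its p-free part run after p's batch
theorem pvShift (p : String) (rest : List String) (d : PySem.Dict String String)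
    (hp : d.contains p = true) :
    rest.foldl pvStepP d =
      (rest.filter (fun q => q != p)).foldl pvStepP (pvIterA p (rest.count p) d) := by
  induction rest generalizing d with
  | nil => rfl
  | cons q rest ih =>
    by_cases hq : q = p
    · subst hq
      simp only [List.foldl_cons, List.filter_cons, bne_self_eq_false, Bool.false_eq_true,
        if_false, List.count_cons_self]
      rw [ih (pvStepP d q) (pvContains_stepP_self d q)]
      rfl
    · have hne : p ≠ q := Ne.symm hq
      have hcq : (pvStepP d q).contains p = true := by
        unfold pvStepP; split <;> simp [PySem.Dict.contains_insert, hp]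
      have hfq : (q != p) = true := by simpa [bne_iff_ne] using hq
      simp only [List.foldl_cons, List.filter_cons, hfq, if_true, List.count_cons,
        List.foldl_cons]
      rw [ih (pvStepP d q) hcq, pvIterA_stepP_comm p q _ d hp hne]
      simp [hq]

-- dedup of a filtered list is discard of the dedup
theorem pvOfList_filter (p : String) (l : List String) :
    PySem.Set.ofList (l.filter (fun q => q != p)) =
      PySem.Set.discard (PySem.Set.ofList l) p := by
  induction l with
  | nil => rfl
  | cons q l ih =>
    by_cases hq : q = p
    · subst hq
      simp only [List.filter_cons, bne_self_eq_false, Bool.false_eq_true, if_false, ih,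
        PySem.Set.ofList_cons, PySem.Set.discard, List.filter_cons, bne_self_eq_false,
        Bool.false_eq_true, if_false, List.filter_filter]
      simp
    · have hfq : (q != p) = true := by simpa [bne_iff_ne] using hq
      simp only [List.filter_cons, hfq, if_true, PySem.Set.ofList_cons, ih,
        PySem.Set.discard, List.filter_cons, List.filter_filter]
      simp [hq, Bool.and_comm]

-- counts of the other prefixes are unchanged by filtering p out
theorem pvCount_filter (p k : String) (l : List String) (hk : k ≠ p) :
    (l.filter (fun q => q != p)).count k = l.count k := by
  exact List.count_filter (by simpa [bne_iff_ne] using hk)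

-- core equivalence: A's fold over the prefix list equals B's batched fold over the counts
theorem pvMain (ps : List String) (d : PySem.Dict String String) :
    ps.foldl pvStepP d =
      ((PySem.Set.ofList ps).map (fun k => (k, (ps.count k : Int)))).foldl pvBatch d := by
  match ps with
  | [] => rfl
  | p :: rest =>
    have hlt : (rest.filter (fun q => q != p)).length < (p :: rest).length := by
      simpa using Nat.lt_succ_of_le (List.length_filter_le _ rest)
    have hrec := pvMain (rest.filter (fun q => q != p))
    rw [List.foldl_cons, pvShift p rest (pvStepP d p) (pvContains_stepP_self d p), hrec]
    rw [PySem.Set.ofList_cons, List.map_cons, List.foldl_cons, ← pvOfList_filter]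
    -- the counts over (p :: rest) restricted to the p-free dedup are the counts over the filtered list
    have hmap : (PySem.Set.ofList (rest.filter (fun q => q != p))).map
          (fun k => (k, ((p :: rest).count k : Int)))
        = (PySem.Set.ofList (rest.filter (fun q => q != p))).map
          (fun k => (k, ((rest.filter (fun q => q != p)).count k : Int))) := by
      apply List.map_congr_left
      intro k hks
      have hk : k ≠ p := by
        have h1 := (PySem.Set.mem_ofList _ _).1 hks
        have h2 := List.of_mem_filter h1
        simpa [bne_iff_ne] using h2
      simp [Ne.symm hk, pvCount_filter p k rest hk]
    rw [hmap]
    congr 1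
    -- head batch: c+1 iterations of A's step at p are B's single batched update
    rw [List.count_cons_self]
    by_cases hp : d.contains p = true
    · rw [show pvStepP d p = d.insert p (d.getD p "" ++ pvExtA) by simp [pvStepP, hp]]
      rw [pvIterA_insert]
      rw [show pvBatch d (p, ((rest.count p + 1 : Nat) : Int))
            = d.insert p (d.getD p "" ++ pvRep pvExtB (rest.count p + 1)) by
        simp [pvBatch, hp]]
      rw [pvExtB_eq,
        show pvRep pvExtA (rest.count p + 1) = pvExtA ++ pvRep pvExtA (rest.count p) from rfl,
        String.append_assoc]
    · have hp' : d.contains p = false := by simpa using hp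
      rw [show pvStepP d p = d.insert p pvHMS by simp [pvStepP, hp']]
      rw [pvIterA_insert]
      rw [show pvBatch d (p, ((rest.count p + 1 : Nat) : Int))
            = d.insert p (pvHMS ++ pvRep pvExtB (rest.count p)) by
        simp [pvBatch, hp']]
      rw [pvExtB_eq]
  termination_by ps.length
  decreasing_by simpa using Nat.lt_succ_of_le (List.length_filter_le _ rest)

-- ===== VERDICT (by name: the statement is the Claim_ definition above) =====
theorem getHiveMetaStore_spec : Claim_equal_getHiveMetaStore := by
  intro keys dict _
  unfold Spec_getHiveMetaStore getHiveMetaStore getHiveMetaStore_alt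
  have hcnt : keys.foldl
      (fun d k => d.insert (pvPrefix k) (d.getD (pvPrefix k) 0 + 1))
      (PySem.Dict.empty : PySem.Dict String Int)
      = PySem.Dict.counter (keys.map pvPrefix) := by
    rw [← PySem.Dict.foldl_insert_getD_add_one_eq_counter, List.foldl_map]
  show (keys.foldl pvStepA (PySem.Dict.mk dict)).items
      = (((keys.foldl
            (fun d k => d.insert (pvPrefix k) (d.getD (pvPrefix k) 0 + 1))
            (PySem.Dict.empty : PySem.Dict String Int)).items).foldl pvBatch
          (PySem.Dict.mk dict)).items
  rw [hcnt, PySem.Dict.items_counter, ← pvMain, List.foldl_map]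
  rfl
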